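-- pv_equiv track=rewrite | github.com/changkun/life-simulator | life/modes/city_growth.py | _city_road_access
-- ===== SOURCE A (Python) =====
-- Z_ROAD = 1
--
-- def _city_road_access(zone, r, c, rows, cols):
--     """Return distance to nearest road (Manhattan, up to 5)."""
--     for dist in range(1, 6):
--         for dr in range(-dist, dist + 1):
--             for dc in range(-dist, dist + 1):
--                 if abs(dr) + abs(dc) != dist:
--                     continue
--                 nr, nc = r + dr, c + dc
--                 if 0 <= nr < rows and 0 <= nc < cols:
--                     if zone[nr][nc] == Z_ROAD:
--                         return dist
--     return 6  # no road nearby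
-- ===== SOURCE B (Python) =====
-- Z_ROAD = 1
--
-- def _city_road_access(zone, r, c, rows, cols):
--     """Return distance to nearest road (Manhattan, up to 5)."""
--     best = 6
--     for dr in range(-5, 6):
--         for dc in range(-5, 6):
--             d = abs(dr) + abs(dc)
--             if not (1 <= d <= 5):
--                 continue
--             nr, nc = r + dr, c + dc
--             if 0 <= nr < rows and 0 <= nc < cols and zone[nr][nc] == Z_ROAD:
--                 best = min(best, d)
--     return best
-- ===== Notes on version B (the rewrite author's own statement) =====
-- stated objective: simpler
-- what changed: Replaces the ring-by-ring expanding search with early return by one flat scan over all offsets (dr,dc) in [-5,5]^2 keeping the running minimum Manhattan distance to a road.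
-- outside the precondition, e.g. on _city_road_access([[0, 1]], 0, 0, 2, 2): A returns 1, B raises IndexError
import Mathlib
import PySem

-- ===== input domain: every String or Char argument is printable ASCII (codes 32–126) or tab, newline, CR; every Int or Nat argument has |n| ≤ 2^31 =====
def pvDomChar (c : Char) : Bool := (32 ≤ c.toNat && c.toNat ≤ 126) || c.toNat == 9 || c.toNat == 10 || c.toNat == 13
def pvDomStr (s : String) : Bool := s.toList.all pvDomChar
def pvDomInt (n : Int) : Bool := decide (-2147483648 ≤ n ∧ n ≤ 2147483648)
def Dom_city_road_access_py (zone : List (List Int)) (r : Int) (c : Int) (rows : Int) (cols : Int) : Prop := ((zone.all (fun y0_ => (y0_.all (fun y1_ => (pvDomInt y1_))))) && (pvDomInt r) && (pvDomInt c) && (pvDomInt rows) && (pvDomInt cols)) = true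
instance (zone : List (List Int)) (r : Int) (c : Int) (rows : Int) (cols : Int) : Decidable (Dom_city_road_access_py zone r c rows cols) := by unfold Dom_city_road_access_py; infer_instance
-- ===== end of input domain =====

-- B replaces A's expanding-ring search (early return on the first ring containing a road) by a
-- single flat scan over all offsets in [-5,5]^2 keeping the running minimum distance: simpler.

-- zone[nr][nc] as Python computes it under the 0 ≤ nr < rows / 0 ≤ nc < cols guards (exact
-- whenever the index is in range of the actual list, which Pre_ guarantees for every guarded access)
def pvCell (zone : List (List Int)) (nr nc : Int) : Option Int :=
  (PySem.List.pyGet? zone nr).bind (fun row => PySem.List.pyGet? row nc)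

-- ===== PORT A =====
-- innermost loop: for dc in range(-dist, dist+1)
def pvAin (zone : List (List Int)) (r c rows cols dist dr : Int) : List Int → Option Int
  | [] => none
  | dc :: rest =>
    if |dr| + |dc| ≠ dist then pvAin zone r c rows cols dist dr rest
    else if 0 ≤ r + dr ∧ r + dr < rows ∧ 0 ≤ c + dc ∧ c + dc < cols then
      if pvCell zone (r + dr) (c + dc) == some 1 then some dist
      else pvAin zone r c rows cols dist dr rest
    else pvAin zone r c rows cols dist dr rest

-- middle loop: for dr in range(-dist, dist+1)
def pvAmid (zone : List (List Int)) (r c rows cols dist : Int) : List Int → Option Int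
  | [] => none
  | dr :: rest =>
    (pvAin zone r c rows cols dist dr (PySem.List.pyRange (-dist) (dist + 1) 1)).orElse
      (fun _ => pvAmid zone r c rows cols dist rest)

-- outer loop: for dist in range(1, 6)
def pvAout (zone : List (List Int)) (r c rows cols : Int) : List Int → Option Int
  | [] => none
  | dist :: rest =>
    (pvAmid zone r c rows cols dist (PySem.List.pyRange (-dist) (dist + 1) 1)).orElse
      (fun _ => pvAout zone r c rows cols rest)

def city_road_access_py (zone : List (List Int)) (r : Int) (c : Int) (rows : Int) (cols : Int) : Int :=
  (pvAout zone r c rows cols (PySem.List.pyRange 1 6 1)).getD 6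

-- ===== PORT B =====
def city_road_access_py_alt (zone : List (List Int)) (r : Int) (c : Int) (rows : Int) (cols : Int) : Int :=
  (PySem.List.pyRange (-5) 6 1).foldl (fun best dr =>
    (PySem.List.pyRange (-5) 6 1).foldl (fun best dc =>
      let d := |dr| + |dc|
      if 1 ≤ d ∧ d ≤ 5 then
        if 0 ≤ r + dr ∧ r + dr < rows ∧ 0 ≤ c + dc ∧ c + dc < cols ∧
            (pvCell zone (r + dr) (c + dc) == some 1) then
          min best d
        else best
      else best) best) 6

-- ===== PRECONDITION & SPEC =====
-- Pre_ excludes inputs whose declared shape (rows, cols) exceeds zone's actual extent on some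
-- guarded cell of the ±5 window: there A raises IndexError (or only escapes it by returning
-- early from a nearer ring), so no equivalence can be claimed.
def Pre_city_road_access_py (zone : List (List Int)) (r : Int) (c : Int) (rows : Int) (cols : Int) : Prop :=
  ∀ dr ∈ PySem.List.pyRange (-5) 6 1, ∀ dc ∈ PySem.List.pyRange (-5) 6 1,
    (1 ≤ |dr| + |dc| ∧ |dr| + |dc| ≤ 5 ∧ 0 ≤ r + dr ∧ r + dr < rows ∧ 0 ≤ c + dc ∧ c + dc < cols) →
    (r + dr < (zone.length : Int) ∧ c + dc < ((zone.getD (r + dr).toNat []).length : Int))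
instance (zone : List (List Int)) (r : Int) (c : Int) (rows : Int) (cols : Int) : Decidable (Pre_city_road_access_py zone r c rows cols) := by unfold Pre_city_road_access_py; infer_instance

def pvWitness_city_road_access_py : List (List Int) × Int × Int × Int × Int := ([[1]], 0, 0, 1, 1)

def Spec_city_road_access_py (zone : List (List Int)) (r : Int) (c : Int) (rows : Int) (cols : Int) (out : Int) : Prop := out = city_road_access_py_alt zone r c rows cols
instance (zone : List (List Int)) (r : Int) (c : Int) (rows : Int) (cols : Int) (out : Int) : Decidable (Spec_city_road_access_py zone r c rows cols out) := by unfold Spec_city_road_access_py; infer_instance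

-- ===== CLAIM (what is proved, stated in full; the proofs are below) =====
def Claim_equal_city_road_access_py : Prop := ∀ (zone : List (List Int)) (r : Int) (c : Int) (rows : Int) (cols : Int), Dom_city_road_access_py zone r c rows cols → Pre_city_road_access_py zone r c rows cols → Spec_city_road_access_py zone r c rows cols (city_road_access_py zone r c rows cols)

-- ===== LEMMAS AND PROOFS =====

-- the per-offset "road here" condition shared by both characterisations
def pvQ (zone : List (List Int)) (r c rows cols dr dc : Int) : Bool :=
  decide (0 ≤ r + dr ∧ r + dr < rows ∧ 0 ≤ c + dc ∧ c + dc < cols) &&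
    (pvCell zone (r + dr) (c + dc) == some 1)

def pvRingHit (zone : List (List Int)) (r c rows cols d : Int) : Prop :=
  ∃ dr ∈ PySem.List.pyRange (-d) (d + 1) 1, ∃ dc ∈ PySem.List.pyRange (-d) (d + 1) 1,
    |dr| + |dc| = d ∧ pvQ zone r c rows cols dr dc = true

def pvPairs : List (Int × Int) :=
  (PySem.List.pyRange (-5) 6 1).flatMap (fun dr => (PySem.List.pyRange (-5) 6 1).map (fun dc => (dr, dc)))

def pvC (zone : List (List Int)) (r c rows cols : Int) (p : Int × Int) : Bool :=
  decide (1 ≤ |p.1| + |p.2| ∧ |p.1| + |p.2| ≤ 5) && pvQ zone r c rows cols p.1 p.2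

def pvHitP (zone : List (List Int)) (r c rows cols k : Int) : Prop :=
  ∃ p ∈ pvPairs, pvC zone r c rows cols p = true ∧ |p.1| + |p.2| = k

-- ---- A side: characterise the loops ----
theorem pvAin_some (zone : List (List Int)) (r c rows cols dist dr : Int) (dcs : List Int)
    (h : ∃ dc ∈ dcs, |dr| + |dc| = dist ∧ pvQ zone r c rows cols dr dc = true) :
    pvAin zone r c rows cols dist dr dcs = some dist := by
  induction dcs with
  | nil => simp at h
  | cons dc rest ih =>
    rcases h with ⟨x, hx, hsum, hq⟩
    rcases List.mem_cons.mp hx with rfl | hxr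
    · simp only [pvQ, Bool.and_eq_true, decide_eq_true_eq] at hq
      obtain ⟨⟨h1, h2, h3, h4⟩, h5⟩ := hq
      simp only [pvAin, hsum]
      simp [h1, h2, h3, h4, h5]
    · have hrec := ih ⟨x, hxr, hsum, hq⟩
      simp only [pvAin]
      split_ifs <;> simp [hrec]
theorem pvAin_none (zone : List (List Int)) (r c rows cols dist dr : Int) (dcs : List Int)
    (h : ∀ dc ∈ dcs, ¬(|dr| + |dc| = dist ∧ pvQ zone r c rows cols dr dc = true)) :
    pvAin zone r c rows cols dist dr dcs = none := by
  induction dcs with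
  | nil => rfl
  | cons dc rest ih =>
    have hrest := ih (fun x hx => h x (List.mem_cons_of_mem _ hx))
    have hhd := h dc (List.mem_cons_self ..)
    simp only [pvAin]
    split_ifs with h1 h2 h3
    · exact hrest
    · refine absurd ⟨by omega, ?_⟩ hhd
      simp only [pvQ, Bool.and_eq_true, decide_eq_true_eq]
      exact ⟨⟨h2.1, h2.2.1, h2.2.2.1, h2.2.2.2⟩, h3⟩
    · exact hrest
    · exact hrest

theorem pvAmid_some (zone : List (List Int)) (r c rows cols dist : Int) (drs : List Int)
    (h : ∃ dr ∈ drs, ∃ dc ∈ PySem.List.pyRange (-dist) (dist + 1) 1,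
          |dr| + |dc| = dist ∧ pvQ zone r c rows cols dr dc = true) :
    pvAmid zone r c rows cols dist drs = some dist := by
  induction drs with
  | nil => simp at h
  | cons dr rest ih =>
    rcases h with ⟨x, hx, hex⟩
    rcases List.mem_cons.mp hx with rfl | hxr
    · simp only [pvAmid, pvAin_some zone r c rows cols dist x _ hex]
      rfl
    · simp only [pvAmid]
      cases hin : pvAin zone r c rows cols dist dr (PySem.List.pyRange (-dist) (dist + 1) 1) with
      | none => simpa [Option.orElse] using ih ⟨x, hxr, hex⟩
      | some v =>
        have hv : v = dist := by
          by_cases hex' : ∃ dc ∈ PySem.List.pyRange (-dist) (dist + 1) 1,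
              |dr| + |dc| = dist ∧ pvQ zone r c rows cols dr dc = true
          · have := pvAin_some zone r c rows cols dist dr _ hex'
            rw [hin] at this; exact Option.some_inj.mp this
          · have := pvAin_none zone r c rows cols dist dr
              (PySem.List.pyRange (-dist) (dist + 1) 1)
              (fun a ha hc => hex' ⟨a, ha, hc⟩)
            rw [hin] at this; cases this
        subst hv
        rfl

theorem pvAmid_none (zone : List (List Int)) (r c rows cols dist : Int) (drs : List Int)
    (h : ∀ dr ∈ drs, ∀ dc ∈ PySem.List.pyRange (-dist) (dist + 1) 1,
          ¬(|dr| + |dc| = dist ∧ pvQ zone r c rows cols dr dc = true)) :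
    pvAmid zone r c rows cols dist drs = none := by
  induction drs with
  | nil => rfl
  | cons dr rest ih =>
    have h1 := pvAin_none zone r c rows cols dist dr _ (h dr (List.mem_cons_self ..))
    have h2 := ih (fun x hx => h x (List.mem_cons_of_mem _ hx))
    simp [pvAmid, Option.orElse, h1, h2]

-- ---- B side: flatten the nested fold and general min-fold facts ----
theorem foldl_foldl_flat {α : Type} (L1 L2 : List α) (g : Int → α → α → Int) (acc : Int) :
    L1.foldl (fun b x => L2.foldl (fun b' y => g b' x y) b) acc
      = (L1.flatMap (fun x => L2.map (fun y => (x, y)))).foldl (fun b p => g b p.1 p.2) acc := by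
  induction L1 generalizing acc with
  | nil => rfl
  | cons x rest ih =>
    simp only [List.foldl_cons, List.flatMap_cons, List.foldl_append, List.foldl_map, ih]

theorem minfold_le {α : Type} (C : α → Bool) (f : α → Int) (L : List α) (acc : Int) :
    L.foldl (fun b p => if C p then min b (f p) else b) acc ≤ acc := by
  induction L generalizing acc with
  | nil => simp
  | cons x rest ih =>
    simp only [List.foldl_cons]
    refine le_trans (ih _) ?_
    split_ifs <;> omega

theorem minfold_le_elem {α : Type} (C : α → Bool) (f : α → Int) (L : List α) (p : α)
    (hc : C p = true) :
    ∀ acc, p ∈ L → L.foldl (fun b q => if C q then min b (f q) else b) acc ≤ f p := by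
  induction L with
  | nil => intro acc hp; simp at hp
  | cons x rest ih =>
    intro acc hp
    simp only [List.foldl_cons]
    rcases List.mem_cons.mp hp with rfl | hpr
    · refine le_trans (minfold_le C f rest _) ?_
      simp [hc]
    · exact ih _ hpr

theorem minfold_attain {α : Type} (C : α → Bool) (f : α → Int) (L : List α) (acc : Int) :
    L.foldl (fun b p => if C p then min b (f p) else b) acc = acc ∨
      ∃ p ∈ L, C p = true ∧ L.foldl (fun b p => if C p then min b (f p) else b) acc = f p := by
  induction L generalizing acc with
  | nil => left; rfl
  | cons x rest ih =>
    simp only [List.foldl_cons]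
    rcases ih (if C x then min acc (f x) else acc) with h | ⟨p, hp, hc, hv⟩
    · rw [h]
      by_cases hcx : C x = true
      · rw [if_pos hcx]
        rcases le_total acc (f x) with hle | hle
        · left; omega
        · right; exact ⟨x, List.mem_cons_self .., hcx, by omega⟩
      · rw [if_neg hcx]; left; rfl
    · right; exact ⟨p, List.mem_cons_of_mem _ hp, hc, hv⟩

theorem alt_eq_minfold (zone : List (List Int)) (r c rows cols : Int) :
    city_road_access_py_alt zone r c rows cols
      = pvPairs.foldl (fun b p => if pvC zone r c rows cols p then min b (|p.1| + |p.2|) else b) 6 := by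
  unfold city_road_access_py_alt pvPairs
  rw [foldl_foldl_flat]
  congr 1
  funext b p
  by_cases hC : pvC zone r c rows cols p = true
  · have hC' := hC
    simp only [pvC, pvQ, Bool.and_eq_true, decide_eq_true_eq] at hC'
    obtain ⟨⟨h1, h2⟩, ⟨h3, h4, h5, h6⟩, h7⟩ := hC'
    simp [h1, h2, h3, h4, h5, h6, h7, hC]
  · conv_rhs => rw [if_neg hC]
    show (if 1 ≤ |p.1| + |p.2| ∧ |p.1| + |p.2| ≤ 5 then
            if 0 ≤ r + p.1 ∧ r + p.1 < rows ∧ 0 ≤ c + p.2 ∧ c + p.2 < cols ∧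
                (pvCell zone (r + p.1) (c + p.2) == some 1) then min b (|p.1| + |p.2|) else b
          else b) = b
    split_ifs with hA hB
    · refine absurd ?_ hC
      simp only [pvC, pvQ, Bool.and_eq_true, decide_eq_true_eq]
      exact ⟨hA, ⟨hB.1, hB.2.1, hB.2.2.1, hB.2.2.2.1⟩, hB.2.2.2.2⟩
    · rfl
    · rfl

-- value of B, pinned down by the pvHitP predicate
theorem alt_eq_of_hit (zone : List (List Int)) (r c rows cols k : Int)
    (hk1 : 1 ≤ k) (hk5 : k ≤ 5) (hit : pvHitP zone r c rows cols k)
    (hnone : ∀ j, 1 ≤ j → j < k → ¬ pvHitP zone r c rows cols j) :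
    city_road_access_py_alt zone r c rows cols = k := by
  rw [alt_eq_minfold]
  rcases hit with ⟨p, hp, hc, hv⟩
  have hle : pvPairs.foldl (fun b q => if pvC zone r c rows cols q then min b (|q.1| + |q.2|) else b) 6 ≤ k := by
    have h := minfold_le_elem (pvC zone r c rows cols) (fun q => |q.1| + |q.2|) pvPairs p hc 6 hp
    exact le_of_le_of_eq h hv
  rcases minfold_attain (pvC zone r c rows cols) (fun q => |q.1| + |q.2|) pvPairs 6 with h | ⟨q, hq, hcq, hvq⟩
  · omega
  · rw [hvq] at hle ⊢
    show |q.1| + |q.2| = k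
    have hle2 : |q.1| + |q.2| ≤ k := hle
    have h1 : 1 ≤ |q.1| + |q.2| := by
      simp only [pvC, Bool.and_eq_true, decide_eq_true_eq] at hcq; exact hcq.1.1
    by_contra hne
    exact hnone (|q.1| + |q.2|) h1 (by omega) ⟨q, hq, hcq, rfl⟩

theorem alt_eq_six (zone : List (List Int)) (r c rows cols : Int)
    (hnone : ∀ j, 1 ≤ j → j ≤ 5 → ¬ pvHitP zone r c rows cols j) :
    city_road_access_py_alt zone r c rows cols = 6 := by
  rw [alt_eq_minfold]
  rcases minfold_attain (pvC zone r c rows cols) (fun q => |q.1| + |q.2|) pvPairs 6 with h | ⟨q, hq, hcq, hvq⟩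
  · exact h
  · have hb : 1 ≤ |q.1| + |q.2| ∧ |q.1| + |q.2| ≤ 5 := by
      simp only [pvC, Bool.and_eq_true, decide_eq_true_eq] at hcq; exact hcq.1
    exact absurd ⟨q, hq, hcq, rfl⟩ (hnone _ hb.1 hb.2)

-- ---- bridge: ring hit ↔ pair hit ----
theorem ring_iff_hitP (zone : List (List Int)) (r c rows cols d : Int)
    (h1 : 1 ≤ d) (h5 : d ≤ 5) :
    pvRingHit zone r c rows cols d ↔ pvHitP zone r c rows cols d := by
  constructor
  · rintro ⟨dr, hdr, dc, hdc, hsum, hq⟩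
    rw [PySem.List.mem_pyRange_one] at hdr hdc
    refine ⟨(dr, dc), ?_, ?_, hsum⟩
    · simp only [pvPairs, List.mem_flatMap, List.mem_map]
      exact ⟨dr, by rw [PySem.List.mem_pyRange_one]; omega,
             dc, by rw [PySem.List.mem_pyRange_one]; omega, rfl⟩
    · simp only [pvC, Bool.and_eq_true, decide_eq_true_eq]
      exact ⟨⟨by omega, by omega⟩, hq⟩
  · rintro ⟨⟨dr, dc⟩, hp, hc, hsum⟩
    simp only at hsum
    simp only [pvC, Bool.and_eq_true, decide_eq_true_eq] at hc
    obtain ⟨⟨hc1, hc5⟩, hq⟩ := hc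
    have hd1 : |dr| ≤ d := by have := abs_nonneg dc; omega
    have hd2 : |dc| ≤ d := by have := abs_nonneg dr; omega
    have hb1 := abs_le.mp hd1
    have hb2 := abs_le.mp hd2
    exact ⟨dr, by rw [PySem.List.mem_pyRange_one]; omega,
           dc, by rw [PySem.List.mem_pyRange_one]; omega, hsum, hq⟩

-- ===== VERDICT (by name: the statement is the Claim_ definition above) =====
theorem city_road_access_py_spec : Claim_equal_city_road_access_py := by
  intro zone r c rows cols _ _
  unfold Spec_city_road_access_py
  unfold city_road_access_py
  have h16 : PySem.List.pyRange 1 6 1 = [1, 2, 3, 4, 5] := by decide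
  rw [h16]
  simp only [pvAout]
  by_cases H1 : pvRingHit zone r c rows cols 1
  · rw [pvAmid_some zone r c rows cols 1 _ H1]
    exact (alt_eq_of_hit zone r c rows cols 1 (by omega) (by omega)
      ((ring_iff_hitP zone r c rows cols 1 (by omega) (by omega)).mp H1)
      (fun j hj1 hj2 => by omega)).symm
  rw [pvAmid_none zone r c rows cols 1 _ (fun a ha b hb hc => H1 ⟨a, ha, b, hb, hc⟩)]
  by_cases H2 : pvRingHit zone r c rows cols 2
  · rw [pvAmid_some zone r c rows cols 2 _ H2]
    refine (alt_eq_of_hit zone r c rows cols 2 (by omega) (by omega)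
      ((ring_iff_hitP zone r c rows cols 2 (by omega) (by omega)).mp H2) ?_).symm
    intro j hj1 hj2 hj
    interval_cases j
    · exact H1 ((ring_iff_hitP zone r c rows cols 1 (by omega) (by omega)).mpr hj)
  rw [pvAmid_none zone r c rows cols 2 _ (fun a ha b hb hc => H2 ⟨a, ha, b, hb, hc⟩)]
  by_cases H3 : pvRingHit zone r c rows cols 3
  · rw [pvAmid_some zone r c rows cols 3 _ H3]
    refine (alt_eq_of_hit zone r c rows cols 3 (by omega) (by omega)
      ((ring_iff_hitP zone r c rows cols 3 (by omega) (by omega)).mp H3) ?_).symm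
    intro j hj1 hj2 hj
    interval_cases j
    · exact H1 ((ring_iff_hitP zone r c rows cols 1 (by omega) (by omega)).mpr hj)
    · exact H2 ((ring_iff_hitP zone r c rows cols 2 (by omega) (by omega)).mpr hj)
  rw [pvAmid_none zone r c rows cols 3 _ (fun a ha b hb hc => H3 ⟨a, ha, b, hb, hc⟩)]
  by_cases H4 : pvRingHit zone r c rows cols 4
  · rw [pvAmid_some zone r c rows cols 4 _ H4]
    refine (alt_eq_of_hit zone r c rows cols 4 (by omega) (by omega)
      ((ring_iff_hitP zone r c rows cols 4 (by omega) (by omega)).mp H4) ?_).symm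
    intro j hj1 hj2 hj
    interval_cases j
    · exact H1 ((ring_iff_hitP zone r c rows cols 1 (by omega) (by omega)).mpr hj)
    · exact H2 ((ring_iff_hitP zone r c rows cols 2 (by omega) (by omega)).mpr hj)
    · exact H3 ((ring_iff_hitP zone r c rows cols 3 (by omega) (by omega)).mpr hj)
  rw [pvAmid_none zone r c rows cols 4 _ (fun a ha b hb hc => H4 ⟨a, ha, b, hb, hc⟩)]
  by_cases H5 : pvRingHit zone r c rows cols 5
  · rw [pvAmid_some zone r c rows cols 5 _ H5]
    refine (alt_eq_of_hit zone r c rows cols 5 (by omega) (by omega)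
      ((ring_iff_hitP zone r c rows cols 5 (by omega) (by omega)).mp H5) ?_).symm
    intro j hj1 hj2 hj
    interval_cases j
    · exact H1 ((ring_iff_hitP zone r c rows cols 1 (by omega) (by omega)).mpr hj)
    · exact H2 ((ring_iff_hitP zone r c rows cols 2 (by omega) (by omega)).mpr hj)
    · exact H3 ((ring_iff_hitP zone r c rows cols 3 (by omega) (by omega)).mpr hj)
    · exact H4 ((ring_iff_hitP zone r c rows cols 4 (by omega) (by omega)).mpr hj)
  · rw [pvAmid_none zone r c rows cols 5 _ (fun a ha b hb hc => H5 ⟨a, ha, b, hb, hc⟩)]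
    refine (alt_eq_six zone r c rows cols ?_).symm
    intro j hj1 hj2 hj
    interval_cases j
    · exact H1 ((ring_iff_hitP zone r c rows cols 1 (by omega) (by omega)).mpr hj)
    · exact H2 ((ring_iff_hitP zone r c rows cols 2 (by omega) (by omega)).mpr hj)
    · exact H3 ((ring_iff_hitP zone r c rows cols 3 (by omega) (by omega)).mpr hj)
    · exact H4 ((ring_iff_hitP zone r c rows cols 4 (by omega) (by omega)).mpr hj)
    · exact H5 ((ring_iff_hitP zone r c rows cols 5 (by omega) (by omega)).mpr hj)
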